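-- pv_equiv track=rewrite | github.com/laukk96/Personal-Discord-Bot | dbot.py | collect_args_frameadd
-- ===== SOURCE A (Python) =====
-- def collect_args_frameadd(args):
--     fname = ""
--     bits = [None, None]
--     index = None
--     if len(args) >= 3:
--         for i in range(0, len(args)):
--             if args[i].isdigit():
--                 if i > 2:
--                     index = args[i]
--                     bits[0] = args[i - 2]
--                     bits[1] = args[i - 1]
--                     for j in range(0, i-2):
--                         fname += args[j] + " "
--                     break
--                 else:
--                     return None, None, None
--             elif i == len(args)-1:
--                 for j in range(0, i-1):
--                     fname += args[j] + " "
--                 bits[0] = args[i-1]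
--                 bits[1] = args[i]
--     fname = fname.strip(" ")
--
--     return fname, bits, index
-- ===== SOURCE B (Python) =====
-- def collect_args_frameadd(args):
--     # Single streaming pass: a two-token sliding window `w` plus a word buffer
--     # `parts` built incrementally (no indices, no pivot search, no prefix re-scan).
--     if len(args) < 3:
--         return "", [None, None], None
--     parts = []   # tokens already shifted out of the window -> fname words
--     w = []       # the (at most) two most recently seen non-digit tokens
--     for tok in args:
--         if tok.isdigit():
--             if not parts:        # digit hit before three tokens were consumed
--                 return None, None, None
--             return " ".join(parts).strip(" "), w, tok
--         if len(w) == 2: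
--             parts.append(w[0])
--             w = [w[1], tok]
--         else:
--             w.append(tok)
--     return " ".join(parts).strip(" "), w, None
-- ===== Notes on version B (the rewrite author's own statement) =====
-- stated objective: alternative
-- what changed: Replaces A's index-based scan (break/early-return, a last-element elif, and inner re-scan loops that rebuild fname from indices) by a single streaming pass holding a two-token sliding window and an incrementally built word buffer, with no index arithmetic or prefix re-scan.
-- outside the precondition, e.g. on collect_args_frameadd(['a', '1', 'b']): A returns (None, None, None), B returns (None, None, None)
import Mathlib
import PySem

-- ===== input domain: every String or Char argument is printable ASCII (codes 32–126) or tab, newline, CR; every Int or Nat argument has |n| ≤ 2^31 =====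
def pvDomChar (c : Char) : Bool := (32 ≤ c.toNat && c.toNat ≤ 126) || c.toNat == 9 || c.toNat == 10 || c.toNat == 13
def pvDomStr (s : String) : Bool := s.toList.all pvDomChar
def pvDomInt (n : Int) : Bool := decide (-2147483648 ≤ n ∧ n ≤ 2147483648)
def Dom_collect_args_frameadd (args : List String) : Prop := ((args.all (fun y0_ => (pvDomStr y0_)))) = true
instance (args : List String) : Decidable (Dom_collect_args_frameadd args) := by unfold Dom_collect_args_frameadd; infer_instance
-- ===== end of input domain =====

-- B replaces A's index-based scan with inner re-scan loops by a single streaming pass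
-- holding a two-token sliding window and an incrementally built word buffer (objective: alternative).

-- ===== PORT A =====
-- inner 'for j in range(0, k): fname += args[j] + " "'
def pvAJoin (args : List String) (k : Nat) (fname : String) : String :=
  (List.range k).foldl (fun acc j => acc ++ (args.getD j "" ++ " ")) fname

-- the 'for i in range(0, len(args))' loop; 'none' encodes Python's early 'return None, None, None'
def pvALoop (args : List String) (i : Nat) (fname : String) (bits : List (Option String)) :
    Option (String × List (Option String) × Option String) :=
  if _h : i < args.length then
    if PySem.Str.strIsdigit (args.getD i "") then
      if 2 < i then
        some (pvAJoin args (i - 2) fname,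
              [some (args.getD (i - 2) ""), some (args.getD (i - 1) "")],
              some (args.getD i ""))
      else none
    else if i = args.length - 1 then
      pvALoop args (i + 1) (pvAJoin args (i - 1) fname)
        [some (args.getD (i - 1) ""), some (args.getD i "")]
    else pvALoop args (i + 1) fname bits
  else some (fname, bits, none)
termination_by args.length - i

def collect_args_frameadd (args : List String) : String × List (Option String) × Option String :=
  if 3 ≤ args.length then
    match pvALoop args 0 "" [none, none] with
    | some (f, b, ix) => (PySem.Str.stripChars f " ", b, ix)
    | none => ("", [none, none], none)  -- Python returns (None, None, None): no value of the declared type; outside Pre_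
  else (PySem.Str.stripChars "" " ", [none, none], none)

-- ===== PORT B =====
-- the 'for tok in args' streaming loop of Source B: parts = word buffer, w = two-token sliding window
def pvBLoop (parts w : List String) : List String → String × List (Option String) × Option String
  | [] => (PySem.Str.stripChars (PySem.Str.join " " parts) " ", w.map some, none)
  | tok :: rest =>
    if PySem.Str.strIsdigit tok then
      if parts = [] then ("", [none, none], none)  -- Source B returns (None, None, None): no value of the declared type; outside Pre_
      else (PySem.Str.stripChars (PySem.Str.join " " parts) " ", w.map some, some tok)
    else if w.length = 2 then
      pvBLoop (parts ++ w.take 1) (w.drop 1 ++ [tok]) rest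
    else
      pvBLoop parts (w ++ [tok]) rest

def collect_args_frameadd_alt (args : List String) : String × List (Option String) × Option String :=
  if args.length < 3 then ("", [none, none], none)
  else pvBLoop [] [] args

-- ===== PRECONDITION & SPEC =====
-- Pre_ excludes exactly the inputs (len ≥ 3 with a digit-token among the first three) on which the Python A
-- executes 'return None, None, None' — None in the str and list slots is no value of the declared return type.
def Pre_collect_args_frameadd (args : List String) : Prop :=
  args.length < 3 ∨ ∀ s ∈ args.take 3, PySem.Str.strIsdigit s = false
instance (args : List String) : Decidable (Pre_collect_args_frameadd args) := by
  unfold Pre_collect_args_frameadd; infer_instance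

def pvWitness_collect_args_frameadd : List String := ["a", "b", "c", "1"]

def Spec_collect_args_frameadd (args : List String) (out : String × List (Option String) × Option String) : Prop := out = collect_args_frameadd_alt args
instance (args : List String) (out : String × List (Option String) × Option String) : Decidable (Spec_collect_args_frameadd args out) := by unfold Spec_collect_args_frameadd; infer_instance

-- ===== CLAIM (what is proved, stated in full; the proofs are below) =====
def Claim_equal_collect_args_frameadd : Prop := ∀ (args : List String), Dom_collect_args_frameadd args → Pre_collect_args_frameadd args → Spec_collect_args_frameadd args (collect_args_frameadd args)

-- ===== LEMMAS AND PROOFS =====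

-- stripping " " from the right absorbs one trailing space
theorem pv_strip_append_space (s : List Char) :
    PySem.Chars.stripChars (s ++ [' ']) [' '] = PySem.Chars.stripChars s [' '] := by
  simp only [PySem.Chars.stripChars, List.dropWhile_append]
  by_cases h : (List.dropWhile (fun c => [' '].contains c) s).isEmpty
  · have h0 : List.dropWhile (fun c => ([' '] : List Char).contains c) s = [] :=
      List.isEmpty_iff.mp h
    rw [h0]
    decide
  · rw [if_neg h, List.reverse_append]
    have h1 : ([' '] : List Char).reverse ++ (List.dropWhile (fun c => ([' '] : List Char).contains c) s).reverse
        = ' ' :: (List.dropWhile (fun c => ([' '] : List Char).contains c) s).reverse := rfl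
    rw [h1, List.dropWhile_cons, if_pos (by decide)]

-- flatten of (token ++ " ") pieces is the " "-join with one trailing space
theorem pv_flatten_eq_join (q : List (List Char)) (hq : q ≠ []) :
    (q.map (fun s => s ++ [' '])).flatten = PySem.Chars.join [' '] q ++ [' '] := by
  induction q with
  | nil => exact absurd rfl hq
  | cons a t ih =>
    cases t with
    | nil => simp [PySem.Chars.join_singleton]
    | cons b t' =>
      rw [List.map_cons, List.flatten_cons, ih (by simp), PySem.Chars.join_cons_cons]
      simp [List.append_assoc]

-- the fname-accumulating inner loop, as a list of characters
theorem pvAJoin_toList (args : List String) (f : String) :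
    ∀ k, k ≤ args.length →
      (pvAJoin args k f).toList
        = f.toList ++ ((args.take k).map (fun s => s.toList ++ [' '])).flatten := by
  intro k
  induction k with
  | zero => intro _; simp [pvAJoin]
  | succ k ih =>
    intro hk
    have hk' : k < args.length := by omega
    have h1 : pvAJoin args (k + 1) f = pvAJoin args k f ++ (args.getD k "" ++ " ") := by
      simp [pvAJoin, List.range_succ]
    have h2 : args.take (k + 1) = args.take k ++ [args[k]] := by
      rw [List.take_add_one, List.getElem?_eq_getElem hk']
      rfl
    have hsp : (" " : String).toList = [' '] := rfl
    rw [h1, String.toList_append, String.toList_append, ih (by omega),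
      List.getD_eq_getElem args "" hk', h2, hsp, List.map_append, List.flatten_append]
    simp only [List.map_cons, List.map_nil, List.flatten_cons, List.flatten_nil,
      List.append_nil, List.append_assoc]

-- stripped concat-with-spaces equals stripped " ".join of the same prefix
theorem pv_strip_concat_eq (args : List String) (k : Nat) (hk : k ≤ args.length) :
    PySem.Str.stripChars (pvAJoin args k "") " "
      = PySem.Str.stripChars (PySem.Str.join " " (args.take k)) " " := by
  have htl : (PySem.Str.stripChars (pvAJoin args k "") " ").toList
      = (PySem.Str.stripChars (PySem.Str.join " " (args.take k)) " ").toList := by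
    rw [PySem.Str.toList_stripChars, PySem.Str.toList_stripChars, PySem.Str.toList_join]
    rw [pvAJoin_toList args "" k hk]
    cases k with
    | zero => simp [PySem.Chars.join_nil]
    | succ k' =>
      have hq : (args.take (k' + 1)).map String.toList ≠ [] := by
        have hne : args.take (k' + 1) ≠ [] := by
          cases hargs : args with
          | nil => rw [hargs] at hk; simp at hk
          | cons x xs => simp
        simpa using hne
      have hmm : (args.take (k' + 1)).map (fun s => s.toList ++ [' '])
          = ((args.take (k' + 1)).map String.toList).map (fun s => s ++ [' ']) := by
        rw [List.map_map]
        rfl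
      rw [hmm, pv_flatten_eq_join _ hq]
      have hsp : (" " : String).toList = [' '] := rfl
      rw [hsp]
      simp [pv_strip_append_space]
  exact String.toList_inj.mp htl

-- first-digit-index facts: the outer loop of A, run from any i ≤ d with untouched state, yields the pivot form
set_option maxHeartbeats 1000000 in
theorem pvALoop_spec (args : List String)
    (hd3 : 3 ≤ List.findIdx (fun s => PySem.Str.strIsdigit s) args) :
    ∀ (m i : Nat), args.length - i ≤ m →
      i ≤ List.findIdx (fun s => PySem.Str.strIsdigit s) args → i < args.length →
      pvALoop args i "" [none, none]
        = some (pvAJoin args (List.findIdx (fun s => PySem.Str.strIsdigit s) args - 2) "",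
            [some (args.getD (List.findIdx (fun s => PySem.Str.strIsdigit s) args - 2) ""),
             some (args.getD (List.findIdx (fun s => PySem.Str.strIsdigit s) args - 1) "")],
            if List.findIdx (fun s => PySem.Str.strIsdigit s) args < args.length then
              some (args.getD (List.findIdx (fun s => PySem.Str.strIsdigit s) args) "")
            else none) := by
  intro m
  induction m with
  | zero => intro i hm hid hin; omega
  | succ m ih =>
    intro i hm hid hin
    have hdlen : List.findIdx (fun s => PySem.Str.strIsdigit s) args ≤ args.length :=
      List.findIdx_le_length
    rw [pvALoop, dif_pos hin]
    by_cases hieq : i = List.findIdx (fun s => PySem.Str.strIsdigit s) args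
    · -- i is the pivot: the digit branch breaks
      have hdig : PySem.Str.strIsdigit (args.getD i "") = true := by
        rw [List.getD_eq_getElem args "" hin]
        subst hieq
        exact List.findIdx_getElem (w := hin)
      rw [if_pos hdig, if_pos (by omega)]
      subst hieq
      rw [if_pos hin]
    · -- i is before the pivot: the token is not a digit
      have hilt : i < List.findIdx (fun s => PySem.Str.strIsdigit s) args := by omega
      have hnd : PySem.Str.strIsdigit (args.getD i "") = false := by
        rw [List.getD_eq_getElem args "" hin]
        exact List.not_of_lt_findIdx hilt
      rw [hnd, if_neg (by simp)]
      by_cases hlast : i = args.length - 1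
      · -- the last element: the elif fills fname/bits, then the loop exits
        have hdn : List.findIdx (fun s => PySem.Str.strIsdigit s) args = args.length := by omega
        rw [if_pos hlast, pvALoop, dif_neg (by omega)]
        rw [if_neg (by omega), hdn]
        have h1 : i - 1 = args.length - 2 := by omega
        have h2 : i = args.length - 1 := hlast
        rw [h1, h2]
      · rw [if_neg hlast]
        exact ih (i + 1) (by omega) (by omega) (by omega)

-- the two-element window at step i, written as a slice
theorem pv_window_pair (args : List String) (i : Nat) (h2 : 2 ≤ i) (hi : i ≤ args.length) :
    (args.take i).drop (i - 2) = [args.getD (i - 2) "", args.getD (i - 1) ""] := by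
  rw [List.getD_eq_getElem args "" (show i - 2 < args.length by omega),
    List.getD_eq_getElem args "" (show i - 1 < args.length by omega)]
  apply List.ext_getElem
  · simp; omega
  · intro n hn hn'
    have hn2 : n < 2 := by simpa using hn'
    have hln : i - 2 + n < args.length := by omega
    rw [List.getElem_drop, List.getElem_take]
    interval_cases n
    · simp
    · simp only [List.getElem_cons_succ, List.getElem_cons_zero]
      congr 1
      omega

-- B's streaming loop, started at any prefix boundary i before the pivot, yields the pivot form
set_option maxHeartbeats 1000000 in
theorem pvBLoop_spec (args : List String) (hlen3 : 3 ≤ args.length) :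
    ∀ (m i : Nat), args.length - i ≤ m →
      i ≤ List.findIdx (fun s => PySem.Str.strIsdigit s) args → i ≤ args.length →
      pvBLoop (args.take (i - 2)) ((args.take i).drop (i - 2)) (args.drop i)
        = (if List.findIdx (fun s => PySem.Str.strIsdigit s) args ≤ 2 then
            ("", [none, none], none)
          else
            (PySem.Str.stripChars
              (PySem.Str.join " " (args.take (List.findIdx (fun s => PySem.Str.strIsdigit s) args - 2))) " ",
             (((args.take (List.findIdx (fun s => PySem.Str.strIsdigit s) args)).drop
                (List.findIdx (fun s => PySem.Str.strIsdigit s) args - 2)).map some),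
             if List.findIdx (fun s => PySem.Str.strIsdigit s) args < args.length then
               some (args.getD (List.findIdx (fun s => PySem.Str.strIsdigit s) args) "")
             else none)) := by
  intro m
  induction m with
  | zero =>
    intro i hm hid hi
    have hieq : i = args.length := by omega
    have hdlen : List.findIdx (fun s => PySem.Str.strIsdigit s) args ≤ args.length :=
      List.findIdx_le_length
    have hdn : List.findIdx (fun s => PySem.Str.strIsdigit s) args = args.length := by omega
    subst hieq
    rw [List.drop_length, List.take_length, hdn, if_neg (by omega), if_neg (by omega)]
    rw [List.take_length]
    rfl
  | succ m ih =>
    intro i hm hid hi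
    have hdlen : List.findIdx (fun s => PySem.Str.strIsdigit s) args ≤ args.length :=
      List.findIdx_le_length
    by_cases hieq : i = args.length
    · -- the loop exhausted the list: no digit token, d = len
      have hdn : List.findIdx (fun s => PySem.Str.strIsdigit s) args = args.length := by omega
      subst hieq
      rw [List.drop_length, List.take_length, hdn, if_neg (by omega), if_neg (by omega)]
      rw [List.take_length]
      rfl
    · have hin : i < args.length := by omega
      rw [List.drop_eq_getElem_cons hin]
      show pvBLoop (args.take (i - 2)) ((args.take i).drop (i - 2)) (args[i] :: args.drop (i + 1)) = _
      rw [pvBLoop]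
      by_cases hpiv : i = List.findIdx (fun s => PySem.Str.strIsdigit s) args
      · -- pivot step: the digit branch of the loop body fires
        have hdig : PySem.Str.strIsdigit args[i] = true := by
          subst hpiv
          exact List.findIdx_getElem (w := hin)
        rw [if_pos hdig]
        by_cases hd2 : List.findIdx (fun s => PySem.Str.strIsdigit s) args ≤ 2
        · have hz : i - 2 = 0 := by omega
          rw [hz, List.take_zero, if_pos rfl, if_pos hd2]
        · have hne : args.take (i - 2) ≠ [] := by
            have : (args.take (i - 2)).length = i - 2 := by
              rw [List.length_take]
              omega
            intro hc
            rw [hc] at this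
            simp at this
            omega
          rw [if_neg hne, if_neg hd2, ← hpiv]
          rw [if_pos hin, List.getD_eq_getElem args "" hin]
      · -- pre-pivot step: not a digit, the window shifts
        have hilt : i < List.findIdx (fun s => PySem.Str.strIsdigit s) args := by omega
        have hnd : PySem.Str.strIsdigit args[i] = false := List.not_of_lt_findIdx hilt
        rw [hnd, if_neg (by simp)]
        by_cases h2 : 2 ≤ i
        · -- full window: shift the oldest token into the word buffer
          have hw : (args.take i).drop (i - 2) = [args.getD (i - 2) "", args.getD (i - 1) ""] :=
            pv_window_pair args i h2 (by omega)
          have hwlen : ((args.take i).drop (i - 2)).length = 2 := by rw [hw]; rfl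
          rw [if_pos hwlen, hw]
          have hparts : args.take (i - 2) ++ [args.getD (i - 2) "", args.getD (i - 1) ""].take 1
              = args.take ((i + 1) - 2) := by
            have h1 : (i + 1) - 2 = (i - 2) + 1 := by omega
            have ht1 : List.take 1 [args.getD (i - 2) "", args.getD (i - 1) ""]
                = [args.getD (i - 2) ""] := rfl
            have hg : args.getD (i - 2) "" = args[i - 2] :=
              List.getD_eq_getElem args "" (by omega)
            rw [ht1, hg, h1, List.take_add_one,
              List.getElem?_eq_getElem (show i - 2 < args.length by omega)]
            rfl
          have hwin : [args.getD (i - 2) "", args.getD (i - 1) ""].drop 1 ++ [args[i]]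
              = (args.take (i + 1)).drop ((i + 1) - 2) := by
            have e1 : (i + 1) - 2 = i - 1 := by omega
            have e2 : (i + 1) - 1 = i := by omega
            rw [pv_window_pair args (i + 1) (by omega) (by omega), e1, e2]
            have hg : args.getD i "" = args[i] := List.getD_eq_getElem args "" hin
            rw [hg]
            rfl
          rw [hparts, hwin]
          exact ih (i + 1) (by omega) (by omega) (by omega)
        · -- filling window (i < 2): just append
          have hwlen : ((args.take i).drop (i - 2)).length ≠ 2 := by
            rw [List.length_drop, List.length_take]
            omega
          rw [if_neg hwlen]
          have hz : i - 2 = 0 := by omega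
          have hz' : (i + 1) - 2 = 0 := by omega
          have hdw : (args.take i).drop (i - 2) ++ [args[i]] = (args.take (i + 1)).drop ((i + 1) - 2) := by
            rw [hz, hz', List.drop_zero, List.drop_zero, List.take_add_one,
              List.getElem?_eq_getElem hin]
            rfl
          rw [hdw]
          have hp : args.take (i - 2) = args.take ((i + 1) - 2) := by rw [hz, hz']
          rw [hp]
          exact ih (i + 1) (by omega) (by omega) (by omega)

-- ===== VERDICT (by name: the statement is the Claim_ definition above) =====
theorem collect_args_frameadd_spec : Claim_equal_collect_args_frameadd := by
  intro args _hdom hpre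
  unfold Spec_collect_args_frameadd
  by_cases h3 : 3 ≤ args.length
  · have hpre' : ∀ s ∈ args.take 3, PySem.Str.strIsdigit s = false := by
      rcases hpre with h | h
      · omega
      · exact h
    have hd3 : 3 ≤ List.findIdx (fun s => PySem.Str.strIsdigit s) args := by
      by_contra hlt
      have hdl : List.findIdx (fun s => PySem.Str.strIsdigit s) args < args.length := by omega
      have hdig : PySem.Str.strIsdigit args[List.findIdx (fun s => PySem.Str.strIsdigit s) args] = true :=
        List.findIdx_getElem (w := hdl)
      have hmem : args[List.findIdx (fun s => PySem.Str.strIsdigit s) args] ∈ args.take 3 := by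
        have hlt3 : List.findIdx (fun s => PySem.Str.strIsdigit s) args < (args.take 3).length := by
          rw [List.length_take]; omega
        have : (args.take 3)[List.findIdx (fun s => PySem.Str.strIsdigit s) args]'hlt3
            = args[List.findIdx (fun s => PySem.Str.strIsdigit s) args] := List.getElem_take
        rw [← this]
        exact List.getElem_mem hlt3
      have := hpre' _ hmem
      rw [this] at hdig
      exact absurd hdig (by simp)
    have hdlen : List.findIdx (fun s => PySem.Str.strIsdigit s) args ≤ args.length :=
      List.findIdx_le_length
    unfold collect_args_frameadd collect_args_frameadd_alt
    rw [if_pos h3, if_neg (by omega)]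
    have hB : pvBLoop [] [] args
        = pvBLoop (args.take (0 - 2)) ((args.take 0).drop (0 - 2)) (args.drop 0) := by
      simp
    rw [hB, pvBLoop_spec args h3 (args.length) 0 (by omega) (by omega) (by omega),
      if_neg (by omega)]
    rw [pvALoop_spec args hd3 (args.length) 0 (by omega) (by omega) (by omega)]
    simp only []
    rw [pv_strip_concat_eq args (List.findIdx (fun s => PySem.Str.strIsdigit s) args - 2) (by omega)]
    rw [pv_window_pair args (List.findIdx (fun s => PySem.Str.strIsdigit s) args) (by omega) hdlen]
    rfl
  · unfold collect_args_frameadd collect_args_frameadd_alt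
    rw [if_neg h3, if_pos (by omega)]
    have : PySem.Str.stripChars "" " " = "" := by decide
    rw [this]
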